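-- pv_equiv track=rewrite | github.com/jasonsikes/QLogo | util/command_parser.py | name_to_cpp_identifier
-- ===== SOURCE A (Python) =====
-- def name_to_cpp_identifier(name):
--     """Return the CPP identifier representation of the command name."""
--     replacements = {
--         '?': '_Q',
--         '.': '_dot_',
--         '-': '_m_',
--         '+': '_p_',
--         '*': '_star_',
--         '/': '_slash_',
--         '<': '_lt_',
--         '>': '_gt_',
--         '=': '_eq_'
--     }
--     for old, new in replacements.items():
--         name = name.replace(old, new)
--     return "cmdStr" + name
-- ===== SOURCE B (Python) =====
-- def name_to_cpp_identifier(name):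
--     """Return the CPP identifier representation of the command name."""
--     parts = ["cmdStr"]
--     for ch in name:
--         if ch == '?':
--             parts.append('_Q')
--         elif ch == '.':
--             parts.append('_dot_')
--         elif ch == '-':
--             parts.append('_m_')
--         elif ch == '+':
--             parts.append('_p_')
--         elif ch == '*':
--             parts.append('_star_')
--         elif ch == '/':
--             parts.append('_slash_')
--         elif ch == '<':
--             parts.append('_lt_')
--         elif ch == '>':
--             parts.append('_gt_')
--         elif ch == '=':
--             parts.append('_eq_')
--         else:
--             parts.append(ch)
--     return "".join(parts)
-- ===== Notes on version B (the rewrite author's own statement) =====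
-- stated objective: alternative
-- what changed: Replaces nine sequential full-string .replace() passes with a single character-by-character loop that translates each char through an explicit if/elif chain into an accumulator list joined once at the end; correct because no replacement output contains any replacement key, so nothing cascades.
import Mathlib
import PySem

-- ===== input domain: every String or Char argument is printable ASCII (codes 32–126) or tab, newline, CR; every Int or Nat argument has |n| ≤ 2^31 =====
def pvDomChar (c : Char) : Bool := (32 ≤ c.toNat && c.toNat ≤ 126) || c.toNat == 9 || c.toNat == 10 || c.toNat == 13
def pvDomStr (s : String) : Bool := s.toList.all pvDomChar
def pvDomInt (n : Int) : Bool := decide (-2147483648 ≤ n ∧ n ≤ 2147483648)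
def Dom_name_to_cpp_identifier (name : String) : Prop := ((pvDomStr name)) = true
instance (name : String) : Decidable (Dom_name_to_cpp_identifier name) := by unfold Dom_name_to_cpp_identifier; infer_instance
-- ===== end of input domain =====

-- B replaces A's nine sequential full-string .replace() passes with one character-by-character
-- loop translating each char through an explicit if/elif chain into an accumulator joined once;
-- sound because no replacement output contains any replacement key (nothing cascades).

-- ===== PORT A =====
def name_to_cpp_identifier (name : String) : String :=
  let replacements : PySem.Dict String String :=
    ⟨[("?", "_Q"), (".", "_dot_"), ("-", "_m_"), ("+", "_p_"), ("*", "_star_"),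
      ("/", "_slash_"), ("<", "_lt_"), (">", "_gt_"), ("=", "_eq_")]⟩
  let name := replacements.items.foldl (fun s p => PySem.Str.replace s p.1 p.2) name
  "cmdStr" ++ name

-- ===== PORT B =====
-- the if/elif chain of Source B's loop body
def altPiece (ch : Char) : String :=
  if ch = '?' then "_Q"
  else if ch = '.' then "_dot_"
  else if ch = '-' then "_m_"
  else if ch = '+' then "_p_"
  else if ch = '*' then "_star_"
  else if ch = '/' then "_slash_"
  else if ch = '<' then "_lt_"
  else if ch = '>' then "_gt_"
  else if ch = '=' then "_eq_"
  else String.ofList [ch]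

-- the 'for ch in name: parts.append(...)' loop, as structural recursion on the chars
def altParts : List Char → List String
  | [] => []
  | ch :: rest => altPiece ch :: altParts rest

def name_to_cpp_identifier_alt (name : String) : String :=
  PySem.Str.join "" ("cmdStr" :: altParts name.toList)

-- ===== PRECONDITION & SPEC =====
def Spec_name_to_cpp_identifier (name : String) (out : String) : Prop := out = name_to_cpp_identifier_alt name
instance (name : String) (out : String) : Decidable (Spec_name_to_cpp_identifier name out) := by unfold Spec_name_to_cpp_identifier; infer_instance

-- ===== CLAIM (what is proved, stated in full; the proofs are below) =====
def Claim_equal_name_to_cpp_identifier : Prop := ∀ (name : String), Dom_name_to_cpp_identifier name → Spec_name_to_cpp_identifier name (name_to_cpp_identifier name)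

-- ===== LEMMAS AND PROOFS =====

-- The common per-character translation both sides are reduced to.
def tr (c : Char) : List Char :=
  if c = '?' then "_Q".toList else if c = '.' then "_dot_".toList
  else if c = '-' then "_m_".toList else if c = '+' then "_p_".toList
  else if c = '*' then "_star_".toList else if c = '/' then "_slash_".toList
  else if c = '<' then "_lt_".toList else if c = '>' then "_gt_".toList
  else if c = '=' then "_eq_".toList else [c]

theorem go_single (c : Char) (new : List Char) :
    ∀ (fuel : Nat) (l acc : List Char), l.length ≤ fuel →
      PySem.Chars.replace.go [c] new fuel l acc
        = acc.reverse ++ l.flatMap (fun x => if x = c then new else [x]) := by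
  intro fuel
  induction fuel with
  | zero =>
    intro l acc h
    have : l = [] := List.eq_nil_of_length_eq_zero (Nat.le_zero.mp h)
    subst this
    simp [PySem.Chars.replace.go]
  | succ n ih =>
    intro l acc h
    cases l with
    | nil => simp [PySem.Chars.replace.go]
    | cons x t =>
      rw [PySem.Chars.replace.go]
      by_cases hx : x = c
      · subst hx
        simp only [List.isPrefixOf, beq_self_eq_true, Bool.true_and, if_true]
        have hd : List.drop [x].length (x :: t) = t := by simp
        rw [hd, ih t (new.reverse ++ acc) (Nat.le_of_succ_le_succ h)]
        simp
      · have hb : (c == x) = false := by simp [Ne.symm hx]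
        simp only [List.isPrefixOf, hb, Bool.false_and]
        rw [ih t (x :: acc) (Nat.le_of_succ_le_succ h)]
        simp [hx]

-- A single-character replace is exactly a character-wise flatMap.
theorem replace_single (l : List Char) (c : Char) (new : List Char) :
    PySem.Chars.replace l [c] new = l.flatMap (fun x => if x = c then new else [x]) := by
  rw [PySem.Chars.replace]
  simp only [List.isEmpty_cons, Bool.false_eq_true, if_false]
  exact go_single c new l.length l [] (le_refl _)

-- The composition of the nine character-wise replaces agrees pointwise with tr
-- (no replacement output contains any replacement key, so nothing cascades).
theorem chain_pointwise (x : Char) :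
    List.flatMap
      (fun x =>
        List.flatMap
          (fun x =>
            List.flatMap
              (fun x =>
                List.flatMap
                  (fun x =>
                    List.flatMap
                      (fun x =>
                        List.flatMap
                          (fun x =>
                            List.flatMap
                              (fun x =>
                                List.flatMap (fun x => if x = '=' then "_eq_".toList else [x])
                                  (if x = '>' then "_gt_".toList else [x]))
                              (if x = '<' then "_lt_".toList else [x]))
                          (if x = '/' then "_slash_".toList else [x]))
                      (if x = '*' then "_star_".toList else [x]))
                  (if x = '+' then "_p_".toList else [x]))
              (if x = '-' then "_m_".toList else [x]))
          (if x = '.' then "_dot_".toList else [x]))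
      (if x = '?' then "_Q".toList else [x]) = tr x := by
  by_cases h1 : x = '?'; · subst h1; rfl
  by_cases h2 : x = '.'; · subst h2; rfl
  by_cases h3 : x = '-'; · subst h3; rfl
  by_cases h4 : x = '+'; · subst h4; rfl
  by_cases h5 : x = '*'; · subst h5; rfl
  by_cases h6 : x = '/'; · subst h6; rfl
  by_cases h7 : x = '<'; · subst h7; rfl
  by_cases h8 : x = '>'; · subst h8; rfl
  by_cases h9 : x = '='; · subst h9; rfl
  simp [tr, h1, h2, h3, h4, h5, h6, h7, h8, h9]

-- A's nine replace passes, at the character-list level, equal one tr pass.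
theorem A_list (l : List Char) :
    PySem.Chars.replace (PySem.Chars.replace (PySem.Chars.replace (PySem.Chars.replace
      (PySem.Chars.replace (PySem.Chars.replace (PySem.Chars.replace (PySem.Chars.replace
        (PySem.Chars.replace l ['?'] "_Q".toList) ['.'] "_dot_".toList) ['-'] "_m_".toList)
        ['+'] "_p_".toList) ['*'] "_star_".toList) ['/'] "_slash_".toList)
        ['<'] "_lt_".toList) ['>'] "_gt_".toList) ['='] "_eq_".toList
      = l.flatMap tr := by
  rw [replace_single, replace_single, replace_single, replace_single, replace_single,
    replace_single, replace_single, replace_single, replace_single]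
  simp only [List.flatMap_assoc]
  apply List.flatMap_congr
  intro x _
  exact chain_pointwise x

theorem A_eq (name : String) :
    name_to_cpp_identifier name = "cmdStr" ++ String.ofList (name.toList.flatMap tr) := by
  unfold name_to_cpp_identifier
  simp only [List.foldl]
  simp only [PySem.Str.replace, String.toList_ofList]
  rw [show ("?" : String).toList = ['?'] from rfl, show ("." : String).toList = ['.'] from rfl,
    show ("-" : String).toList = ['-'] from rfl, show ("+" : String).toList = ['+'] from rfl,
    show ("*" : String).toList = ['*'] from rfl, show ("/" : String).toList = ['/'] from rfl,
    show ("<" : String).toList = ['<'] from rfl, show (">" : String).toList = ['>'] from rfl,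
    show ("=" : String).toList = ['='] from rfl]
  rw [A_list]

theorem intercalate_nil (ls : List (List Char)) : List.intercalate [] ls = ls.flatten := by
  induction ls with
  | nil => rfl
  | cons h t ih =>
    cases t with
    | nil => simp [List.intercalate]
    | cons h2 t2 => simp_all [List.intercalate, List.intersperse]

-- B's if/elif chain agrees pointwise with tr at the char-list level.
theorem altPiece_toList (c : Char) : (altPiece c).toList = tr c := by
  unfold altPiece tr
  split_ifs <;> simp

-- The loop's collected pieces flatten to one tr pass.
theorem altParts_flatten (l : List Char) :
    ((altParts l).map String.toList).flatten = l.flatMap tr := by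
  induction l with
  | nil => rfl
  | cons c t ih => simp [altParts, altPiece_toList, ih]

theorem B_eq (name : String) :
    name_to_cpp_identifier_alt name = "cmdStr" ++ String.ofList (name.toList.flatMap tr) := by
  unfold name_to_cpp_identifier_alt
  simp only [PySem.Str.join, PySem.Chars.join]
  rw [show ("" : String).toList = [] from rfl, intercalate_nil]
  simp only [List.map_cons, List.flatten_cons, altParts_flatten]
  rw [String.ofList_append]
  rfl

-- ===== VERDICT (by name: the statement is the Claim_ definition above) =====
theorem name_to_cpp_identifier_spec : Claim_equal_name_to_cpp_identifier := by
  intro name _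
  unfold Spec_name_to_cpp_identifier
  rw [A_eq, B_eq]
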